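-- pv_equiv track=rewrite | github.com/Ran147/Project_T | prueba2.py | insertar_digito
-- ===== SOURCE A (Python) =====
-- def insertar_digito(numero_ordenado, digito):
--     resultado = 0
--     multiplicador = 1
--     while numero_ordenado > 0:
--         if numero_ordenado % 10 >= digito:
--             resultado += numero_ordenado % 10 * multiplicador
--             multiplicador *= 10
--             numero_ordenado //= 10
--         else:
--             break
--     resultado += digito * multiplicador
--     resultado += numero_ordenado * multiplicador * 10
--     return resultado
-- ===== SOURCE B (Python) =====
-- def insertar_digito(numero_ordenado, digito):
--     if numero_ordenado > 0 and numero_ordenado % 10 >= digito: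
--         return insertar_digito(numero_ordenado // 10, digito) * 10 + numero_ordenado % 10
--     return numero_ordenado * 10 + digito
-- ===== Notes on version B (the rewrite author's own statement) =====
-- stated objective: simpler
-- what changed: Replaces the explicit while loop with accumulator/multiplier state by a direct recursion on numero_ordenado // 10 that rebuilds the number on return from the call stack.
import Mathlib
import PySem

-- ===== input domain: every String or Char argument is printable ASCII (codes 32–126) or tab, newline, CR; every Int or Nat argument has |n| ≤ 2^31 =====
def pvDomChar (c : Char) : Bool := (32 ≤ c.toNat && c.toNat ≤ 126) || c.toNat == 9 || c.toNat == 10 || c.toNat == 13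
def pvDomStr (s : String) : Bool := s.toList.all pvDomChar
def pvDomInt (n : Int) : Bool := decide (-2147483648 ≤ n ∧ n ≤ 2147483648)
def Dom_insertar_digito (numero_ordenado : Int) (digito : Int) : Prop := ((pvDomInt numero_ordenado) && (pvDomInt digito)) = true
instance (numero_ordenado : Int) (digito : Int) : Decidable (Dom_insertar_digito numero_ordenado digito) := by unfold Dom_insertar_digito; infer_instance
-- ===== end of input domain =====

-- B replaces A's while loop with accumulator/multiplier state by a direct
-- recursion on numero_ordenado // 10 (simpler decomposition; same cost).

-- termination helper for both recursions: for n > 0, n // 10 has smaller toNat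
theorem pv_floordiv10_toNat_lt (n : Int) (h : 0 < n) :
    (PySem.Int.floordiv n 10).toNat < n.toNat := by
  rw [PySem.Int.floordiv_eq_ediv_of_pos (by norm_num)]
  have h1 : n / 10 < n := Int.ediv_lt_of_lt_mul (by norm_num) (by omega)
  have h2 : 0 ≤ n / 10 := Int.ediv_nonneg h.le (by norm_num)
  omega

-- ===== PORT A =====
-- the while loop of A, with its state (numero_ordenado, resultado, multiplicador)
def insertar_digito_loop (digito numero_ordenado resultado multiplicador : Int) : Int :=
  if h : numero_ordenado > 0 ∧ PySem.Int.mod numero_ordenado 10 ≥ digito then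
    insertar_digito_loop digito (PySem.Int.floordiv numero_ordenado 10)
      (resultado + PySem.Int.mod numero_ordenado 10 * multiplicador) (multiplicador * 10)
  else
    resultado + digito * multiplicador + numero_ordenado * multiplicador * 10
termination_by numero_ordenado.toNat
decreasing_by exact pv_floordiv10_toNat_lt _ h.1

def insertar_digito (numero_ordenado : Int) (digito : Int) : Int :=
  insertar_digito_loop digito numero_ordenado 0 1

-- ===== PORT B =====
def insertar_digito_alt (numero_ordenado : Int) (digito : Int) : Int :=
  if h : numero_ordenado > 0 ∧ PySem.Int.mod numero_ordenado 10 ≥ digito then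
    insertar_digito_alt (PySem.Int.floordiv numero_ordenado 10) digito * 10
      + PySem.Int.mod numero_ordenado 10
  else
    numero_ordenado * 10 + digito
termination_by numero_ordenado.toNat
decreasing_by exact pv_floordiv10_toNat_lt _ h.1

-- ===== PRECONDITION & SPEC =====
def Spec_insertar_digito (numero_ordenado : Int) (digito : Int) (out : Int) : Prop := out = insertar_digito_alt numero_ordenado digito
instance (numero_ordenado : Int) (digito : Int) (out : Int) : Decidable (Spec_insertar_digito numero_ordenado digito out) := by unfold Spec_insertar_digito; infer_instance

-- ===== CLAIM (what is proved, stated in full; the proofs are below) =====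
def Claim_equal_insertar_digito : Prop := ∀ (numero_ordenado : Int) (digito : Int), Dom_insertar_digito numero_ordenado digito → Spec_insertar_digito numero_ordenado digito (insertar_digito numero_ordenado digito)

-- ===== LEMMAS AND PROOFS =====
theorem insertar_digito_loop_eq_alt (digito numero_ordenado resultado multiplicador : Int) :
    insertar_digito_loop digito numero_ordenado resultado multiplicador
      = resultado + insertar_digito_alt numero_ordenado digito * multiplicador := by
  induction numero_ordenado, resultado, multiplicador
    using insertar_digito_loop.induct (digito := digito) with
  | case1 n res mult h ih =>
    rw [insertar_digito_loop, insertar_digito_alt, dif_pos h, dif_pos h, ih]; ring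
  | case2 n res mult h =>
    rw [insertar_digito_loop, insertar_digito_alt, dif_neg h, dif_neg h]; ring

-- ===== VERDICT (by name: the statement is the Claim_ definition above) =====
theorem insertar_digito_spec : Claim_equal_insertar_digito := by
  intro n d _
  unfold Spec_insertar_digito insertar_digito
  rw [insertar_digito_loop_eq_alt]; ring
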